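-- pv_equiv track=rewrite | github.com/sboyateja/Sentiment-Analysis | happiest_state.py | calSenti
-- ===== SOURCE A (Python) =====
-- def calSenti(sc1, tweet):#here we are calculating the sentiment score according to the sentiment dictionary.
--     sentiment = 0
--     if 'text' in tweet: # here we checking according to the tweets havinf the text
--         words = tweet['text'].split() # we will split the text into the individual words
--         for word in words:
--             if word in sc1:# we are checking the word is present in the sentiment where data in dictionary.
--                 sentiment += sc1[word] # here we are incrementing the sentimental score
--     return sentiment # it returns the sentimental score.
-- ===== SOURCE B (Python) =====
-- def calSenti(sc1, tweet):
--     text = tweet.get('text')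
--     if text is None:
--         return 0
--     words = text.split()
--     return sum(v * words.count(w) for w, v in sc1.items())
-- ===== Notes on version B (the rewrite author's own statement) =====
-- stated objective: alternative
-- what changed: B inverts the loop: it iterates over the sentiment dictionary's entries and adds score * words.count(word) for each entry, instead of A's scan over the tokens with a per-token dictionary lookup.
import Mathlib
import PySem

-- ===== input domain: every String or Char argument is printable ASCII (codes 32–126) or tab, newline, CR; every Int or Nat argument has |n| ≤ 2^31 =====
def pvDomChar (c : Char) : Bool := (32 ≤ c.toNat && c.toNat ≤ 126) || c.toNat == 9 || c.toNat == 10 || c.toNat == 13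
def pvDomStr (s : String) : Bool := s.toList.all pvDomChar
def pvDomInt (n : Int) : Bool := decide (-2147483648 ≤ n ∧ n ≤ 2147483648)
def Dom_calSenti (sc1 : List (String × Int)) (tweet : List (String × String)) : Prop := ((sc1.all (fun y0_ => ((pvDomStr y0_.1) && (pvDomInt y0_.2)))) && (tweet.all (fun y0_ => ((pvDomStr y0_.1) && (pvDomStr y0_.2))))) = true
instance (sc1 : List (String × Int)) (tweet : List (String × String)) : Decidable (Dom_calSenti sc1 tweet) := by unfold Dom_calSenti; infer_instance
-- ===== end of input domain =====

-- B inverts the loop: it iterates over the sentiment dictionary's entries and adds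
-- score * words.count(word), instead of A's token scan with a per-token lookup (objective: alternative).

-- ===== PORT A =====
def calSenti (sc1 : List (String × Int)) (tweet : List (String × String)) : Int :=
  let sentiment : Int := 0
  if (PySem.Dict.mk tweet).contains "text" then
    let words := PySem.Str.split₀ (((PySem.Dict.mk tweet).get? "text").getD "")
    words.foldl (fun sentiment word =>
      match (PySem.Dict.mk sc1).get? word with
      | some v => sentiment + v
      | none => sentiment) sentiment
  else sentiment

-- ===== PORT B =====
-- 'for w, v in sc1.items()': the dict's items are its distinct keys (first occurrence,
-- first-match value, matching the dict convention used for A's lookups).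
def calSenti_alt (sc1 : List (String × Int)) (tweet : List (String × String)) : Int :=
  match (PySem.Dict.mk tweet).get? "text" with
  | none => 0
  | some text =>
    let words := PySem.Str.split₀ text
    ((PySem.Set.ofList (sc1.map Prod.fst)).map
      (fun w => (((PySem.Dict.mk sc1).get? w).getD 0) * (words.count w : Int))).sum

-- ===== PRECONDITION & SPEC =====
def Spec_calSenti (sc1 : List (String × Int)) (tweet : List (String × String)) (out : Int) : Prop := out = calSenti_alt sc1 tweet
instance (sc1 : List (String × Int)) (tweet : List (String × String)) (out : Int) : Decidable (Spec_calSenti sc1 tweet out) := by unfold Spec_calSenti; infer_instance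

-- ===== CLAIM (what is proved, stated in full; the proofs are below) =====
def Claim_equal_calSenti : Prop := ∀ (sc1 : List (String × Int)) (tweet : List (String × String)), Dom_calSenti sc1 tweet → Spec_calSenti sc1 tweet (calSenti sc1 tweet)

-- ===== LEMMAS AND PROOFS =====

-- the score a single word contributes (0 when absent from sc1)
def wordScore (sc1 : List (String × Int)) (w : String) : Int :=
  ((PySem.Dict.mk sc1).get? w).getD 0

-- A's fold is the sum of wordScore over the tokens
theorem sideA (sc1 : List (String × Int)) (ws : List String) :
    ws.foldl (fun sentiment word =>
      match (PySem.Dict.mk sc1).get? word with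
      | some v => sentiment + v
      | none => sentiment) 0 = (ws.map (wordScore sc1)).sum := by
  have h : (fun (sentiment : Int) (word : String) =>
      match (PySem.Dict.mk sc1).get? word with
      | some v => sentiment + v
      | none => sentiment) = fun acc w => acc + wordScore sc1 w := by
    funext acc w
    unfold wordScore
    cases (PySem.Dict.mk sc1).get? w <;> simp
  rw [h, PySem.List.foldl_add ws (wordScore sc1) 0]
  simp

-- summing an indicator over a Nodup list picks out at most the one matching element
theorem sum_indicator (K : List String) (hK : K.Nodup) (w : String) (f : String → Int) :
    (K.map (fun k => if k = w then f k else 0)).sum = if w ∈ K then f w else 0 := by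
  induction K with
  | nil => simp
  | cons k K ih =>
    rcases List.nodup_cons.1 hK with ⟨hk, hK'⟩
    simp only [List.map_cons, List.sum_cons, ih hK', List.mem_cons]
    by_cases hkw : k = w
    · subst hkw; simp [hk]
    · have hwk : ¬ w = k := fun h => hkw h.symm
      simp [hkw, hwk]

-- loop inversion: summing f(k) * count(k, ws) over distinct keys K equals summing f over ws,
-- provided f vanishes off K
theorem sum_map_add (K : List String) (g h : String → Int) :
    (K.map (fun k => g k + h k)).sum = (K.map g).sum + (K.map h).sum := by
  induction K with
  | nil => simp
  | cons a K ih =>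
    simp only [List.map_cons, List.sum_cons, ih]
    ring

theorem sum_mul_count (K : List String) (hK : K.Nodup) (f : String → Int)
    (hf : ∀ w, w ∉ K → f w = 0) (ws : List String) :
    (K.map (fun k => f k * (ws.count k : Int))).sum = (ws.map f).sum := by
  induction ws with
  | nil => simp
  | cons w ws ih =>
    have hsplit : (fun k => f k * (((w :: ws).count k : Nat) : Int))
        = fun k => f k * (ws.count k : Int) + (if k = w then f k else 0) := by
      funext k
      by_cases hkw : k = w
      · subst hkw
        have hcount : (k :: ws).count k = ws.count k + 1 := by
          rw [List.count_cons]
          simp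
        rw [hcount]
        push_cast
        rw [if_pos rfl]
        ring
      · have hwk : ¬ w = k := fun h => hkw h.symm
        have hcount : (w :: ws).count k = ws.count k := by
          rw [List.count_cons]
          simp [hwk]
        rw [hcount, if_neg hkw]
        ring
    rw [hsplit, sum_map_add, ih, sum_indicator K hK w f]
    by_cases hw : w ∈ K
    · rw [if_pos hw, List.map_cons, List.sum_cons]; ring
    · rw [if_neg hw, List.map_cons, List.sum_cons, hf w hw]; ring

-- ===== VERDICT (by name: the statement is the Claim_ definition above) =====
theorem calSenti_spec : Claim_equal_calSenti := by
  intro sc1 tweet _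
  unfold Spec_calSenti calSenti calSenti_alt
  cases hget : (PySem.Dict.mk tweet).get? "text" with
  | none =>
    have : (PySem.Dict.mk tweet).contains "text" = false := by
      rw [PySem.Dict.contains_eq_isSome_get?, hget]; rfl
    simp [this]
  | some text =>
    have hc : (PySem.Dict.mk tweet).contains "text" = true := by
      rw [PySem.Dict.contains_eq_isSome_get?, hget]; rfl
    simp only [hc, if_true, Option.getD_some]
    rw [sideA]

    have hK : (PySem.Set.ofList (sc1.map Prod.fst)).Nodup := PySem.Set.nodup_ofList _
    have hf : ∀ w, w ∉ PySem.Set.ofList (sc1.map Prod.fst) → wordScore sc1 w = 0 := by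
      intro w hw
      unfold wordScore
      rw [PySem.Set.mem_ofList] at hw
      have : (PySem.Dict.mk sc1).get? w = none := by
        rw [PySem.Dict.get?_eq_none_iff_not_mem_keys]
        simpa [PySem.Dict.keys_mk] using hw
      simp [this]
    rw [← sum_mul_count _ hK (wordScore sc1) hf]
    unfold wordScore
    rfl
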